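-- pv_equiv track=rewrite | github.com/tarak1006/python | unit3tests/factormath.py | get_hcf
-- ===== SOURCE A (Python) =====
-- def get_hcf(i1,i2):
--         r=[]
--         for m,n in i1:
--             for p,q in i2:
--                 if m==p:
--                     if n>q:
--                         r.append((m,q))
--                     else:
--                         r.append((m,n))
--         return sorted(r)
-- ===== SOURCE B (Python) =====
-- def get_hcf(i1, i2):
--     # Hash join: index i2's exponents by prime once, then one pass over i1.
--     idx = {}
--     for p, q in i2:
--         idx.setdefault(p, []).append(q)
--     r = []
--     for m, n in i1:
--         for q in idx.get(m, []):
--             r.append((m, min(n, q)))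
--     return sorted(r)
-- ===== Notes on version B (the rewrite author's own statement) =====
-- stated objective: faster
-- what changed: Replaces the nested-loop join (scanning all of i2 for every i1 entry) with a hash join: i2 is grouped by prime into a dict once, and a single pass over i1 looks up only the matching exponents, emitting (m, min(n,q)).
import Mathlib
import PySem

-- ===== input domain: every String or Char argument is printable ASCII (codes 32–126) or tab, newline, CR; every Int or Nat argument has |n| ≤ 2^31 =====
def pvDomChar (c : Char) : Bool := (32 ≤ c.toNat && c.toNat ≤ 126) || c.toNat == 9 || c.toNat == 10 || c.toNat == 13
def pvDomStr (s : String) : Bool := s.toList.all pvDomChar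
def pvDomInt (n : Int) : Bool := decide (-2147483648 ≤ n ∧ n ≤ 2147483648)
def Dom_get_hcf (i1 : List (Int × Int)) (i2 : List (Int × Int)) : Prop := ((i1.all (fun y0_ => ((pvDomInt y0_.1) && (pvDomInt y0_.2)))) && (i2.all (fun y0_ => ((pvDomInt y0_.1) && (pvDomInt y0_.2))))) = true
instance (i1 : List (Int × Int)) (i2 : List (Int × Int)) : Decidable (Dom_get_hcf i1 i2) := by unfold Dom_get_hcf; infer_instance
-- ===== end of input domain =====

-- B replaces A's nested-loop join with a hash join (index i2 by prime once, then one pass over i1): faster.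

-- ===== PORT A =====
def get_hcf (i1 : List (Int × Int)) (i2 : List (Int × Int)) : List (Int × Int) :=
  let r := i1.foldl (fun r mn =>
    i2.foldl (fun r pq =>
      if mn.1 == pq.1 then
        if mn.2 > pq.2 then r ++ [(mn.1, pq.2)]
        else r ++ [(mn.1, mn.2)]
      else r) r) []
  PySem.List.sorted2 r (fun x => x.1) (fun x => x.2)

-- ===== PORT B =====
def get_hcf_alt (i1 : List (Int × Int)) (i2 : List (Int × Int)) : List (Int × Int) :=
  let idx : PySem.Dict Int (List Int) :=
    i2.foldl (fun d pq => d.modify pq.1 [] (· ++ [pq.2])) PySem.Dict.empty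
  let r := i1.foldl (fun r mn =>
    (idx.getD mn.1 []).foldl (fun r q => r ++ [(mn.1, min mn.2 q)]) r) []
  PySem.List.sorted2 r (fun x => x.1) (fun x => x.2)

-- ===== PRECONDITION & SPEC =====
def Spec_get_hcf (i1 : List (Int × Int)) (i2 : List (Int × Int)) (out : List (Int × Int)) : Prop := out = get_hcf_alt i1 i2
instance (i1 : List (Int × Int)) (i2 : List (Int × Int)) (out : List (Int × Int)) : Decidable (Spec_get_hcf i1 i2 out) := by unfold Spec_get_hcf; infer_instance

-- ===== CLAIM (what is proved, stated in full; the proofs are below) =====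
def Claim_equal_get_hcf : Prop := ∀ (i1 : List (Int × Int)) (i2 : List (Int × Int)), Dom_get_hcf i1 i2 → Spec_get_hcf i1 i2 (get_hcf i1 i2)

-- ===== LEMMAS AND PROOFS =====

-- A's inner scan over i2 appends exactly the matching pairs, in i2's order.
theorem innerA_eq (i2 : List (Int × Int)) (m n : Int) (r : List (Int × Int)) :
    i2.foldl (fun r pq =>
      if m == pq.1 then
        if n > pq.2 then r ++ [(m, pq.2)] else r ++ [(m, n)]
      else r) r
    = r ++ (i2.filter (fun pq => pq.1 == m)).map (fun pq => (m, min n pq.2)) := by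
  induction i2 generalizing r with
  | nil => simp
  | cons hd tl ih =>
    simp only [List.foldl_cons, List.filter_cons, ih]
    by_cases h : hd.1 = m
    · have hm : min n hd.2 = if n > hd.2 then hd.2 else n := by
        simp [min_def]; omega
      simp [h, hm]
      split <;> simp
    · simp [h, Ne.symm h]

-- B's inner loop over a list of exponents appends the corresponding pairs.
theorem innerB_eq (qs : List Int) (m n : Int) (r : List (Int × Int)) :
    qs.foldl (fun r q => r ++ [(m, min n q)]) r
    = r ++ qs.map (fun q => (m, min n q)) := by
  induction qs generalizing r with
  | nil => simp
  | cons hd tl ih => simp [ih]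

-- the two accumulations produce the same list r
theorem acc_eq (i1 i2 : List (Int × Int)) (r : List (Int × Int)) :
    i1.foldl (fun r mn =>
      i2.foldl (fun r pq =>
        if mn.1 == pq.1 then
          if mn.2 > pq.2 then r ++ [(mn.1, pq.2)]
          else r ++ [(mn.1, mn.2)]
        else r) r) r
    = i1.foldl (fun r mn =>
        (((i2.foldl (fun d pq => d.modify pq.1 [] (· ++ [pq.2]))
            (PySem.Dict.empty : PySem.Dict Int (List Int))).getD mn.1 [])).foldl
          (fun r q => r ++ [(mn.1, min mn.2 q)]) r) r := by
  induction i1 generalizing r with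
  | nil => rfl
  | cons hd tl ih =>
    simp only [List.foldl_cons]
    rw [innerA_eq, innerB_eq, PySem.Dict.getD_foldl_modify_append,
        PySem.Dict.getD_empty]
    simp only [List.nil_append, List.map_map, Function.comp_def]
    exact ih _

-- ===== VERDICT (by name: the statement is the Claim_ definition above) =====
theorem get_hcf_spec : Claim_equal_get_hcf := by
  intro i1 i2 _
  unfold Spec_get_hcf get_hcf get_hcf_alt
  simp only
  rw [acc_eq]
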